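-- pv_equiv track=rewrite | github.com/reudekx/algorithm | 구현/순열과조합.py | repeated_permutations
-- ===== SOURCE A (Python) =====
-- def repeated_permutations(arr, n):
--     chosen = []
--
--     def generate():
--         if len(chosen) == n:
--             yield chosen[:]
--             return
--
--         for i in range(len(arr)):
--             chosen.append(arr[i])
--             yield from generate()
--             chosen.pop()
--
--     return generate()
-- ===== SOURCE B (Python) =====
-- def repeated_permutations(arr, n):
--     def generate():
--         if n < 0:
--             return
--         result = [[]]
--         for _ in range(n):
--             result = [p + [x] for p in result for x in arr]
--         yield from result
--     return generate()
-- ===== Notes on version B (the rewrite author's own statement) =====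
-- stated objective: alternative
-- what changed: Replaced A's depth-first recursive generator over a shared mutable 'chosen' list by an iterative breadth-first construction that builds all length-k prefixes level by level with a list-comprehension product, yielding the finished level.
import Mathlib
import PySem

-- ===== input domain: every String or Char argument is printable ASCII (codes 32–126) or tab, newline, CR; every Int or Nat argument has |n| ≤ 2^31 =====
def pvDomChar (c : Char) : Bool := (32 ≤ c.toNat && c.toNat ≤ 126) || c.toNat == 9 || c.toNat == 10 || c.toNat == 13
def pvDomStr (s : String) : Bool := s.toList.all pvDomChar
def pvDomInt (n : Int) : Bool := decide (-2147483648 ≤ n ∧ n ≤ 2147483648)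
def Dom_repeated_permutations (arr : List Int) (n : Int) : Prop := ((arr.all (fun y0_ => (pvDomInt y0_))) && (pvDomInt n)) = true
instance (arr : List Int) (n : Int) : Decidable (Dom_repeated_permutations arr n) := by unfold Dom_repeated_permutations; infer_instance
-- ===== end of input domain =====

-- B builds the product iteratively level by level (breadth-first) instead of A's
-- depth-first recursive generator over a shared mutable list; objective: alternative.
-- A returns a lazy generator; the equivalence proved here is about the list of yielded values.

-- ===== PORT A =====
-- A's recursive generator; the recursion depth is n - len(chosen), so the fuel
-- parameter (initially n.toNat) only makes the same computation total: inside
-- Pre_ it never runs out.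
def genA (arr : List Int) (n : Int) (chosen : List Int) (fuel : Nat) : List (List Int) :=
  if (chosen.length : Int) = n then [chosen]
  else
    match fuel with
    | 0 => []
    | f + 1 =>
      -- for i in range(len(arr)): chosen.append(arr[i]); yield from generate(); chosen.pop()
      -- (indices are in range, so getD is exact here)
      (List.range arr.length).flatMap (fun i => genA arr n (chosen ++ [arr.getD i 0]) f)

def repeated_permutations (arr : List Int) (n : Int) : List (List Int) :=
  genA arr n [] n.toNat

-- ===== PORT B =====
def repeated_permutations_alt (arr : List Int) (n : Int) : List (List Int) :=
  if n < 0 then []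
  else (List.range n.toNat).foldl
    (fun result _ => result.flatMap (fun p => arr.map (fun x => p ++ [x]))) [[]]

-- ===== PRECONDITION & SPEC =====
-- Pre_ excludes n < 0 with non-empty arr: there consuming A's generator raises
-- RecursionError (len(chosen) can never equal a negative n).
def Pre_repeated_permutations (arr : List Int) (n : Int) : Prop := 0 ≤ n ∨ arr = []
instance (arr : List Int) (n : Int) : Decidable (Pre_repeated_permutations arr n) := by
  unfold Pre_repeated_permutations; infer_instance
def pvWitness_repeated_permutations : List Int × Int := ([1, 2], 2)

def Spec_repeated_permutations (arr : List Int) (n : Int) (out : List (List Int)) : Prop :=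
  out = repeated_permutations_alt arr n
instance (arr : List Int) (n : Int) (out : List (List Int)) : Decidable (Spec_repeated_permutations arr n out) := by
  unfold Spec_repeated_permutations; infer_instance

-- ===== CLAIM (what is proved, stated in full; the proofs are below) =====
def Claim_equal_repeated_permutations : Prop := ∀ (arr : List Int) (n : Int), Dom_repeated_permutations arr n → Pre_repeated_permutations arr n → Spec_repeated_permutations arr n (repeated_permutations arr n)
-- ===== LEMMAS AND PROOFS =====

-- the common reference: all length-k sequences over arr, lexicographic, last position fastest
def prodL (arr : List Int) : Nat → List (List Int)
  | 0 => [[]]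
  | k + 1 => arr.flatMap (fun a => (prodL arr k).map (a :: ·))

lemma range_flatMap_getD (l : List Int) (f : Int → List (List Int)) :
    (List.range l.length).flatMap (fun i => f (l.getD i 0)) = l.flatMap f := by
  induction l with
  | nil => simp
  | cons a t ih =>
    simp only [List.length_cons, List.range_succ_eq_map, List.flatMap_cons, List.flatMap_map,
      List.getD_cons_zero, List.getD_cons_succ]
    rw [ih]

lemma genA_eq (arr : List Int) (n : Int) :
    ∀ (fuel : Nat) (chosen : List Int), (chosen.length : Int) + fuel = n →
      genA arr n chosen fuel = (prodL arr fuel).map (chosen ++ ·) := by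
  intro fuel
  induction fuel with
  | zero =>
    intro chosen h
    simp only [Nat.cast_zero, add_zero] at h
    simp [genA, h, prodL]
  | succ f ih =>
    intro chosen h
    have hne : (chosen.length : Int) ≠ n := by omega
    rw [genA]
    simp only [hne, if_false]
    rw [range_flatMap_getD arr (fun a => genA arr n (chosen ++ [a]) f)]
    have : ∀ a, genA arr n (chosen ++ [a]) f = (prodL arr f).map ((chosen ++ [a]) ++ ·) := by
      intro a
      apply ih
      simp only [List.length_append, List.length_cons, List.length_nil]
      push_cast
      omega
    simp only [this, prodL, List.map_flatMap, List.map_map]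
    apply List.flatMap_congr
    intro a _
    congr 1
    funext v
    simp

lemma step_prodL (arr : List Int) :
    ∀ k, (prodL arr k).flatMap (fun p => arr.map (fun x => p ++ [x])) = prodL arr (k + 1) := by
  intro k
  induction k with
  | zero =>
    show ([[]] : List (List Int)).flatMap (fun p => arr.map (fun x => p ++ [x]))
        = arr.flatMap (fun a => [[a]])
    induction arr with
    | nil => rfl
    | cons a t iht => simp_all [List.flatMap]
  | succ f ih =>
    show (prodL arr (f + 1)).flatMap _ = prodL arr (f + 2)
    rw [show prodL arr (f + 1) = arr.flatMap (fun a => (prodL arr f).map (a :: ·)) from rfl]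
    rw [List.flatMap_assoc]
    have : ∀ a, ((prodL arr f).map (a :: ·)).flatMap (fun p => arr.map (fun x => p ++ [x]))
        = ((prodL arr f).flatMap (fun p => arr.map (fun x => p ++ [x]))).map (a :: ·) := by
      intro a
      simp only [List.flatMap_map, List.map_flatMap, List.map_map]
      apply List.flatMap_congr
      intro p _
      congr 1
    calc (arr.flatMap fun a => ((prodL arr f).map (a :: ·)).flatMap
            (fun p => arr.map (fun x => p ++ [x])))
        = arr.flatMap (fun a => ((prodL arr f).flatMap
            (fun p => arr.map (fun x => p ++ [x]))).map (a :: ·)) := by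
          exact List.flatMap_congr (fun a _ => this a)
      _ = arr.flatMap (fun a => (prodL arr (f + 1)).map (a :: ·)) := by rw [ih]
      _ = prodL arr (f + 2) := rfl

lemma fold_eq (arr : List Int) :
    ∀ k, (List.range k).foldl
      (fun result _ => result.flatMap (fun p => arr.map (fun x => p ++ [x]))) [[]]
      = prodL arr k := by
  intro k
  induction k with
  | zero => simp [prodL]
  | succ f ih =>
    rw [List.range_succ, List.foldl_append, ih, List.foldl_cons, List.foldl_nil, step_prodL]

-- ===== VERDICT (by name: the statement is the Claim_ definition above) =====
theorem repeated_permutations_spec : Claim_equal_repeated_permutations := by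
  intro arr n _ hpre
  unfold Spec_repeated_permutations repeated_permutations repeated_permutations_alt
  by_cases hn : n < 0
  · have harr : arr = [] := by
      rcases hpre with h | h
      · omega
      · exact h
    have hz : n.toNat = 0 := Int.toNat_of_nonpos (le_of_lt hn)
    subst harr
    simp [hz, genA, hn, show (0:Int) ≠ n by omega]
  · have h0 : 0 ≤ n := by omega
    simp only [hn, if_false]
    rw [fold_eq, genA_eq arr n n.toNat []]
    · simp
    · simp [Int.toNat_of_nonneg h0]
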